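-- pv_equiv track=rewrite | github.com/zl-xiang/rule-mining | popper/er/er_util.py | get_collection_diff
-- ===== SOURCE A (Python) =====
-- def get_collection_diff(collection:list[set]):
--     intersect = collection[0]
--     union = set()
--     for s in collection[1:]:
--         intersect = intersect.intersection(s)
--
--     for s in collection:
--         union = union.union(s)
--     return union.difference(intersect)
-- ===== SOURCE B (Python) =====
-- def get_collection_diff(collection):
--     # Count, for each element, how many of the sets contain it; an element is in the
--     # answer iff it occurs in some set but not in all n of them.
--     n = len(collection)
--     counts = {}
--     for s in collection:
--         for x in s:
--             counts[x] = counts.get(x, 0) + 1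
--     return {x for x, c in counts.items() if c != n}
-- ===== Notes on version B (the rewrite author's own statement) =====
-- stated objective: idiomatic
-- what changed: Replaces the two set-algebra folds (intersection fold, union fold, then difference) by a single frequency table over all sets: an element is returned iff its set-count differs from len(collection).
import Mathlib
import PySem

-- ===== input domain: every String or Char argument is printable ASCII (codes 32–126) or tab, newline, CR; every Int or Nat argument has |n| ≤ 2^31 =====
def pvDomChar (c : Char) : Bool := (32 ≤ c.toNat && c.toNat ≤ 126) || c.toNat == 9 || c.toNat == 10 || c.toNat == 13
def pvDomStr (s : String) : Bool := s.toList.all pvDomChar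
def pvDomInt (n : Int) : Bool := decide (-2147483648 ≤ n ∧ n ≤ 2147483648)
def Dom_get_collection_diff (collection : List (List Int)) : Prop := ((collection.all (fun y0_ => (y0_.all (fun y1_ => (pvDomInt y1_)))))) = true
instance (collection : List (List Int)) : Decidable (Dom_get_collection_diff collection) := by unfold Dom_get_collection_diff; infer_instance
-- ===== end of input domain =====

-- B replaces A's union/intersection/difference set-algebra folds with one per-element
-- frequency table: an element is returned iff its set-count differs from len(collection)
-- (objective: idiomatic; same asymptotic cost).

-- ===== PORT A =====
def get_collection_diff (collection : List (List Int)) : List Int :=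
  let intersect0 : PySem.Set Int := (PySem.List.pyGet? collection 0).getD []   -- collection[0]; none (IndexError) excluded by Pre_
  let intersect : PySem.Set Int :=
    (PySem.List.slice collection (some 1) none).foldl (fun acc s => PySem.Set.inter acc s) intersect0
  let union : PySem.Set Int :=
    collection.foldl (fun acc s => PySem.Set.union acc s) PySem.Set.empty
  PySem.Set.diff union intersect

-- ===== PORT B =====
def get_collection_diff_alt (collection : List (List Int)) : List Int :=
  let n : Int := collection.length
  let counts : PySem.Dict Int Int :=
    collection.foldl (fun d s => s.foldl (fun d x => d.insert x (d.getD x 0 + 1)) d) PySem.Dict.empty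
  PySem.Set.ofList ((counts.items.filter (fun p => p.2 != n)).map Prod.fst)

-- ===== PRECONDITION & SPEC =====
-- Pre_ excludes the empty collection, on which A raises IndexError (collection[0]) while
-- B would return the empty set; the
-- Nodup condition only states the set invariant of the parameter's type (list of SETS:
-- each inner list holds distinct elements), it excludes no valid Python input.
def Pre_get_collection_diff (collection : List (List Int)) : Prop :=
  collection ≠ [] ∧ ∀ s ∈ collection, s.Nodup
instance (collection : List (List Int)) : Decidable (Pre_get_collection_diff collection) := by
  unfold Pre_get_collection_diff; infer_instance
def pvWitness_get_collection_diff : List (List Int) := [[1, 2], [2, 3]]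

def Spec_get_collection_diff (collection : List (List Int)) (out : List Int) : Prop :=
  out = get_collection_diff_alt collection
instance (collection : List (List Int)) (out : List Int) : Decidable (Spec_get_collection_diff collection out) := by
  unfold Spec_get_collection_diff; infer_instance

-- ===== CLAIM (what is proved, stated in full; the proofs are below) =====
def Claim_equal_get_collection_diff : Prop := ∀ (collection : List (List Int)), Dom_get_collection_diff collection → Pre_get_collection_diff collection → Spec_get_collection_diff collection (get_collection_diff collection)

-- ===== LEMMAS AND PROOFS =====

-- B's result is the first-occurrence dedup of the concatenation, filtered by count ≠ n.
theorem alt_eq_filter (collection : List (List Int)) :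
    get_collection_diff_alt collection =
      (PySem.Set.ofList collection.flatten).filter
        (fun x => ((collection.flatten.count x : Int) != (collection.length : Int))) := by
  show PySem.Set.ofList (((collection.foldl
      (fun d s => s.foldl (fun d x => d.insert x (d.getD x 0 + 1)) d)
      PySem.Dict.empty).items.filter (fun p => p.2 != (collection.length : Int))).map Prod.fst) = _
  have hc : collection.foldl (fun d s => s.foldl (fun d x => d.insert x (d.getD x 0 + 1)) d)
      PySem.Dict.empty = PySem.Dict.counter collection.flatten := by
    rw [← PySem.Dict.foldl_insert_getD_add_one_eq_counter, List.foldl_flatten]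
  rw [hc, PySem.Dict.items_counter, List.filter_map, List.map_map]
  have hnodup : ((PySem.Set.ofList collection.flatten).filter
      (fun x => ((collection.flatten.count x : Int) != (collection.length : Int)))).Nodup :=
    (PySem.Set.nodup_ofList _).filter _
  rw [← PySem.Set.ofList_eq_self_of_nodup _ hnodup]
  simp [Function.comp_def]

-- A's union fold is the first-occurrence dedup of the concatenation.
theorem union_eq (collection : List (List Int)) :
    collection.foldl (fun acc s => PySem.Set.union acc s) PySem.Set.empty =
      PySem.Set.ofList collection.flatten := by
  show collection.foldl (fun acc s => s.foldl PySem.Set.add acc) [] = _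
  rw [← List.foldl_flatten]
  rfl

-- Membership in A's intersection fold.
theorem mem_inter_foldl (rest : List (List Int)) (c : List Int) (x : Int) :
    x ∈ rest.foldl (fun acc s => PySem.Set.inter acc s) c ↔ x ∈ c ∧ ∀ s ∈ rest, x ∈ s := by
  induction rest generalizing c with
  | nil => simp
  | cons s rest ih =>
      simp only [List.foldl_cons, ih, PySem.Set.mem_inter, List.mem_cons]
      constructor
      · rintro ⟨⟨hx, hs⟩, h⟩
        exact ⟨hx, fun t ht => by rcases ht with rfl | ht; exact hs; exact h t ht⟩
      · rintro ⟨hx, h⟩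
        exact ⟨⟨hx, h s (Or.inl rfl)⟩, fun t ht => h t (Or.inr ht)⟩

theorem sum_counts_le (x : Int) (L : List (List Int)) (h : ∀ s ∈ L, s.Nodup) :
    (L.map (List.count x)).sum ≤ L.length := by
  induction L with
  | nil => simp
  | cons c L ih =>
      have hc : c.count x ≤ 1 := List.nodup_iff_count_le_one.mp (h c (by simp)) x
      have := ih (fun s hs => h s (by simp [hs]))
      simp only [List.map_cons, List.sum_cons, List.length_cons]
      omega

theorem count_eq_len_iff (x : Int) (L : List (List Int)) (h : ∀ s ∈ L, s.Nodup) :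
    L.flatten.count x = L.length ↔ ∀ s ∈ L, x ∈ s := by
  rw [List.count_flatten]
  induction L with
  | nil => simp
  | cons c L ih =>
      have hc1 : c.count x ≤ 1 := List.nodup_iff_count_le_one.mp (h c (by simp)) x
      have hle := sum_counts_le x L (fun s hs => h s (by simp [hs]))
      have ihL := ih (fun s hs => h s (by simp [hs]))
      simp only [List.map_cons, List.sum_cons, List.length_cons, List.mem_cons]
      constructor
      · intro heq
        have h1 : c.count x = 1 ∧ (L.map (List.count x)).sum = L.length := by omega
        have hxc : x ∈ c := List.count_pos_iff.mp (by omega)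
        exact fun s hs => by rcases hs with rfl | hs; exact hxc; exact (ihL.mp h1.2) s hs
      · intro hall
        have hxc : 0 < c.count x := List.count_pos_iff.mpr (hall c (Or.inl rfl))
        have : (L.map (List.count x)).sum = L.length := ihL.mpr (fun s hs => hall s (Or.inr hs))
        omega

-- ===== VERDICT (by name: the statement is the Claim_ definition above) =====
theorem get_collection_diff_spec : Claim_equal_get_collection_diff := by
  intro collection _ hpre
  obtain ⟨hne, hnd⟩ := hpre
  unfold Spec_get_collection_diff
  rcases collection with _ | ⟨c, rest⟩
  · exact absurd rfl hne
  rw [alt_eq_filter]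
  unfold get_collection_diff
  simp only [PySem.List.slice_from_one, List.tail_cons]
  rw [union_eq]
  have h0 : (PySem.List.pyGet? (c :: rest) 0).getD [] = c := by
    simp [PySem.List.pyGet?, PySem.List.pyIdx?]
  rw [h0]
  unfold PySem.Set.diff
  apply List.filter_congr
  intro x hx
  have hint : (PySem.Set.contains (rest.foldl (fun acc s => PySem.Set.inter acc s) c) x = true)
      ↔ ∀ s ∈ c :: rest, x ∈ s := by
    rw [PySem.Set.contains_iff, mem_inter_foldl]
    simp
  have hcnt := count_eq_len_iff x (c :: rest) hnd
  rcases Decidable.em (∀ s ∈ c :: rest, x ∈ s) with hall | hall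
  · have h1 : PySem.Set.contains (rest.foldl (fun acc s => PySem.Set.inter acc s) c) x = true :=
      hint.mpr hall
    have h2 : ((c :: rest).flatten.count x : Int) = ((c :: rest).length : Int) := by
      exact_mod_cast hcnt.mpr hall
    rw [h1, h2]
    simp
  · have h1 : PySem.Set.contains (rest.foldl (fun acc s => PySem.Set.inter acc s) c) x = false := by
      rw [Bool.eq_false_iff]; intro h; exact hall (hint.mp h)
    have h2 : ((c :: rest).flatten.count x : Int) ≠ ((c :: rest).length : Int) := by
      intro h; exact hall (hcnt.mp (by exact_mod_cast h))
    rw [h1]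
    simp only [List.flatten_cons, List.count_append, List.length_cons] at h2
    push_cast at h2
    simp [bne_iff_ne]
    omega
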